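-- pv_equiv track=rewrite | github.com/alexgarces98/Python | loteria.py | maximo_premio
-- ===== SOURCE A (Python) =====
-- def aciertos(apuesta,combinacion_ganadora):
--     aciertos = 0
--     for numero in apuesta:
--         if numero in combinacion_ganadora:
--             aciertos += 1
--     return aciertos
--
-- def maximo_premio (lista_apuestas,combinacion_ganadora):
--     """ lista, lista -> bool
--         OBJ: Determina el máximo número de aciertos de una apuesta de la lotería primitiva.
--         PRE: apuestas y comb. ganadora ordenados ascendentemente
--     """
--     if lista_apuestas == []:
--         resultado = 0
--     else:
--         aciertos_actual=aciertos(lista_apuestas[0],combinacion_ganadora)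
--         if aciertos_actual == 6:
--             resultado = 6
--         else:
--             resultado = max(aciertos_actual, \
--                             maximo_premio(lista_apuestas[1:],combinacion_ganadora))
--     return resultado
-- ===== SOURCE B (Python) =====
-- def maximo_premio(lista_apuestas, combinacion_ganadora):
--     ganadores = set(combinacion_ganadora)
--     resultado = 0
--     for apuesta in lista_apuestas:
--         c = sum(1 for numero in apuesta if numero in ganadores)
--         if c == 6:
--             return max(resultado, 6)
--         resultado = max(resultado, c)
--     return resultado
-- ===== Notes on version B (the rewrite author's own statement) =====
-- stated objective: faster
-- what changed: Replaces the recursive helper-based scan with a single iterative loop over the bets keeping a running max (early return on a 6-hit bet) and a prebuilt set of winning numbers for O(1) membership instead of an inner list scan.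
import Mathlib
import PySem

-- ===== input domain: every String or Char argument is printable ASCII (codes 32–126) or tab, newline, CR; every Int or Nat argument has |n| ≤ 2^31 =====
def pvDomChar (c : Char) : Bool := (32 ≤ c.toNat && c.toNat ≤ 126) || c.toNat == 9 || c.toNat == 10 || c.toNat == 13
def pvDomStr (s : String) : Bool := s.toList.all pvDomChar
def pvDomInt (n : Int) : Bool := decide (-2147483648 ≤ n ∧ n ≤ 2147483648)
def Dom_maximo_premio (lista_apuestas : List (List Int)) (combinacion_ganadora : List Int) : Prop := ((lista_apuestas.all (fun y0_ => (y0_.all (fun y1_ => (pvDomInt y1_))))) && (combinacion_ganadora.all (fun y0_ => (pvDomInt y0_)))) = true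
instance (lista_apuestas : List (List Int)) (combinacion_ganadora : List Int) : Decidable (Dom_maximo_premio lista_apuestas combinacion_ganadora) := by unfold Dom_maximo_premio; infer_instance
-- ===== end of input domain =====

-- B replaces A's recursion + quadratic membership helper with one iterative pass keeping a running max and a prebuilt set of winning numbers (simpler decomposition, same results).


-- ===== PORT A =====
-- helper 'aciertos': for-loop accumulating membership hits
def aciertosA (apuesta : List Int) (combinacion_ganadora : List Int) : Int :=
  apuesta.foldl (fun ac numero => if numero ∈ combinacion_ganadora then ac + 1 else ac) 0

def maximo_premio (lista_apuestas : List (List Int)) (combinacion_ganadora : List Int) : Int :=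
  match lista_apuestas with
  | [] => 0
  | ap :: rest =>
    let aciertos_actual := aciertosA ap combinacion_ganadora
    if aciertos_actual = 6 then 6
    else max aciertos_actual (maximo_premio rest combinacion_ganadora)

-- ===== PORT B =====
-- the generator-sum 'sum(1 for numero in apuesta if numero in ganadores)'
def cuentaB (ganadores : PySem.Set Int) (apuesta : List Int) : Int :=
  apuesta.foldl (fun ac numero => ac + (if numero ∈ ganadores then 1 else 0)) 0

-- the for-loop with accumulator 'resultado' and an early return on c == 6
def loopB (ganadores : PySem.Set Int) (lista : List (List Int)) (resultado : Int) : Int :=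
  match lista with
  | [] => resultado
  | apuesta :: rest =>
    let c := cuentaB ganadores apuesta
    if c = 6 then max resultado 6
    else loopB ganadores rest (max resultado c)

def maximo_premio_alt (lista_apuestas : List (List Int)) (combinacion_ganadora : List Int) : Int :=
  loopB (PySem.Set.ofList combinacion_ganadora) lista_apuestas 0

-- ===== PRECONDITION & SPEC =====
def Spec_maximo_premio (lista_apuestas : List (List Int)) (combinacion_ganadora : List Int) (out : Int) : Prop := out = maximo_premio_alt lista_apuestas combinacion_ganadora
instance (lista_apuestas : List (List Int)) (combinacion_ganadora : List Int) (out : Int) : Decidable (Spec_maximo_premio lista_apuestas combinacion_ganadora out) := by unfold Spec_maximo_premio; infer_instance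

-- ===== CLAIM (what is proved, stated in full; the proofs are below) =====
def Claim_equal_maximo_premio : Prop := ∀ (lista_apuestas : List (List Int)) (combinacion_ganadora : List Int), Dom_maximo_premio lista_apuestas combinacion_ganadora → Spec_maximo_premio lista_apuestas combinacion_ganadora (maximo_premio lista_apuestas combinacion_ganadora)

-- ===== LEMMAS AND PROOFS =====

-- both per-bet counters agree (membership in the set = membership in the list)
theorem cuentaB_eq_aciertos_gen (cg : List Int) (ap : List Int) (s : Int) :
    ap.foldl (fun ac numero => ac + (if numero ∈ PySem.Set.ofList cg then 1 else 0)) s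
      = ap.foldl (fun ac numero => if numero ∈ cg then ac + 1 else ac) s := by
  induction ap generalizing s with
  | nil => rfl
  | cons x xs ih =>
    simp only [List.foldl_cons, PySem.Set.mem_ofList] at *
    by_cases h : x ∈ cg <;> simp only [h, if_pos, if_neg, not_false_iff] <;>
      first
        | exact ih _
        | simpa using ih _

theorem cuentaB_eq_aciertos (cg : List Int) (ap : List Int) :
    cuentaB (PySem.Set.ofList cg) ap = aciertosA ap cg :=
  cuentaB_eq_aciertos_gen cg ap 0

theorem maximo_premio_nonneg (l : List (List Int)) (cg : List Int) :
    0 ≤ maximo_premio l cg := by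
  induction l with
  | nil => simp [maximo_premio]
  | cons ap rest ih =>
    simp only [maximo_premio]
    split
    · norm_num
    · exact le_trans ih (le_max_right _ _)

theorem loopB_eq (cg : List Int) (l : List (List Int)) (res : Int) (h : 0 ≤ res) :
    loopB (PySem.Set.ofList cg) l res = max res (maximo_premio l cg) := by
  induction l generalizing res with
  | nil => simp [loopB, maximo_premio, max_eq_left h]
  | cons ap rest ih =>
    simp only [loopB, maximo_premio, cuentaB_eq_aciertos]
    split
    · rfl
    · rw [ih (max res (aciertosA ap cg)) (le_trans h (le_max_left _ _)), max_assoc]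

-- ===== VERDICT (by name: the statement is the Claim_ definition above) =====
theorem maximo_premio_spec : Claim_equal_maximo_premio := by
  intro l cg _
  unfold Spec_maximo_premio maximo_premio_alt
  rw [loopB_eq cg l 0 le_rfl, max_eq_right (maximo_premio_nonneg l cg)]
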